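-- pv_equiv track=rewrite | github.com/ivangris/task-garden | apps/api/app/services/local_models.py | select_preferred_chat_model
-- ===== SOURCE A (Python) =====
-- PREFERRED_CHAT_MODELS = ("gemma3:4b", "llama3.1:8b", "qwen2.5:7b")
--
-- EMBEDDING_MODEL_MARKERS = ("embed", "embedding", "nomic-embed", "mxbai-embed", "bge-", "all-minilm")
--
-- def is_chat_model_name(model_name: str) -> bool:
--     lowered = model_name.lower()
--     return not any(marker in lowered for marker in EMBEDDING_MODEL_MARKERS)
--
-- def select_preferred_chat_model(model_names: list[str]) -> str | None:
--     chat_models = [name for name in model_names if is_chat_model_name(name)]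
--     if not chat_models:
--         return None
--     for preferred in PREFERRED_CHAT_MODELS:
--         if preferred in chat_models:
--             return preferred
--     return sorted(chat_models)[0]
-- ===== SOURCE B (Python) =====
-- PREFERRED_CHAT_MODELS = ("gemma3:4b", "llama3.1:8b", "qwen2.5:7b")
--
-- EMBEDDING_MODEL_MARKERS = ("embed", "embedding", "nomic-embed", "mxbai-embed", "bge-", "all-minilm")
--
-- def is_chat_model_name(model_name: str) -> bool:
--     lowered = model_name.lower()
--     return not any(marker in lowered for marker in EMBEDDING_MODEL_MARKERS)
--
-- def _priority(name: str) -> int: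
--     return PREFERRED_CHAT_MODELS.index(name) if name in PREFERRED_CHAT_MODELS else len(PREFERRED_CHAT_MODELS)
--
-- def select_preferred_chat_model(model_names: list[str]) -> str | None:
--     chat_models = [name for name in model_names if is_chat_model_name(name)]
--     if not chat_models:
--         return None
--     return min(chat_models, key=lambda name: (_priority(name), name))
-- ===== Notes on version B (the rewrite author's own statement) =====
-- stated objective: idiomatic
-- what changed: Replaced A's preference loop with membership tests plus a sorted-list fallback by a single min over the chat models with the lexicographic key (preference index or len(PREFERRED) if absent, name).
import Mathlib
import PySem

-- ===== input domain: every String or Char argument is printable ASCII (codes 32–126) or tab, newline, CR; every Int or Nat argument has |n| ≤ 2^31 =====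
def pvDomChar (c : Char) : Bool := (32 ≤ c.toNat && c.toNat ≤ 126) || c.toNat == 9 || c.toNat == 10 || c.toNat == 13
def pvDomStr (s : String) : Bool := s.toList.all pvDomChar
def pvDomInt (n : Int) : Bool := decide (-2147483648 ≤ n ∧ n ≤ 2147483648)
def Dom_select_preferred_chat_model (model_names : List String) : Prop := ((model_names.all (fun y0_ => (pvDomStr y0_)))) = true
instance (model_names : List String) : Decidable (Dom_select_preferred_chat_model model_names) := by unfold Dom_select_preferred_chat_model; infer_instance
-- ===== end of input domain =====

-- B replaces A's preference loop plus sorted-list fallback by a single min with the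
-- lexicographic key (preference index, name) — a simpler one-pass decomposition (no speed claim).

-- ===== PORT A =====
def PREFERRED_CHAT_MODELS : List String := ["gemma3:4b", "llama3.1:8b", "qwen2.5:7b"]

def EMBEDDING_MODEL_MARKERS : List String := ["embed", "embedding", "nomic-embed", "mxbai-embed", "bge-", "all-minilm"]

def is_chat_model_name (model_name : String) : Bool :=
  let lowered := PySem.Str.lower model_name
  !(EMBEDDING_MODEL_MARKERS.any (fun marker => PySem.Str.isIn marker lowered))

def select_preferred_chat_model (model_names : List String) : Option String :=
  let chat_models := model_names.filter (fun name => is_chat_model_name name)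
  if chat_models.isEmpty then none
  else
    match PREFERRED_CHAT_MODELS.find? (fun preferred => chat_models.contains preferred) with
    | some preferred => some preferred
    | none => (PySem.List.sorted chat_models (fun x => x) false).head?  -- sorted(chat_models)[0] of a nonempty list

-- ===== PORT B =====
-- _priority(name): PREFERRED_CHAT_MODELS.index(name) if present else len(PREFERRED_CHAT_MODELS);
-- List.idxOf is exactly this (index of first occurrence, length if absent).
def chat_priority (name : String) : Nat := PREFERRED_CHAT_MODELS.idxOf name

def select_preferred_chat_model_alt (model_names : List String) : Option String :=
  let chat_models := model_names.filter (fun name => is_chat_model_name name)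
  if chat_models.isEmpty then none
  else PySem.List.min2? chat_models (fun name => chat_priority name) (fun name => name)

-- ===== PRECONDITION & SPEC =====
def Spec_select_preferred_chat_model (model_names : List String) (out : Option String) : Prop := out = select_preferred_chat_model_alt model_names
instance (model_names : List String) (out : Option String) : Decidable (Spec_select_preferred_chat_model model_names out) := by unfold Spec_select_preferred_chat_model; infer_instance

-- ===== CLAIM (what is proved, stated in full; the proofs are below) =====
def Claim_equal_select_preferred_chat_model : Prop := ∀ (model_names : List String), Dom_select_preferred_chat_model model_names → Spec_select_preferred_chat_model model_names (select_preferred_chat_model model_names)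

-- ===== LEMMAS AND PROOFS =====

-- "min-key ≤" order used by B's min: smaller priority first, then alphabetical.
def keyle (m y : String) : Prop :=
  chat_priority m < chat_priority y ∨ (chat_priority m = chat_priority y ∧ m ≤ y)

lemma keyle_refl (m : String) : keyle m m := Or.inr ⟨rfl, le_refl m⟩

lemma keyle_trans {a b c : String} (h1 : keyle a b) (h2 : keyle b c) : keyle a c := by
  rcases h1 with h1 | ⟨h1, h1'⟩ <;> rcases h2 with h2 | ⟨h2, h2'⟩
  · exact Or.inl (Nat.lt_trans h1 h2)
  · exact Or.inl (h2 ▸ h1)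
  · exact Or.inl (h1 ▸ h2)
  · exact Or.inr ⟨h1.trans h2, le_trans h1' h2'⟩

lemma keyle_antisymm {a b : String} (h1 : keyle a b) (h2 : keyle b a) : a = b := by
  rcases h1 with h1 | ⟨h1, h1'⟩ <;> rcases h2 with h2 | ⟨h2, h2'⟩
  · omega
  · omega
  · omega
  · exact le_antisymm h1' h2'

-- the Boolean condition min2?'s fold uses to replace the current minimum m by x
def stepCond (x m : String) : Bool :=
  decide (chat_priority x < chat_priority m) || (!decide (chat_priority m < chat_priority x) && decide (x < m))

lemma stepCond_true {x m : String} (h : stepCond x m = true) : keyle x m := by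
  unfold stepCond at h
  simp only [Bool.or_eq_true, Bool.and_eq_true, Bool.not_eq_true', decide_eq_true_eq, decide_eq_false_iff_not] at h
  rcases h with h | ⟨h1, h2⟩
  · exact Or.inl h
  · rcases Nat.lt_or_ge (chat_priority x) (chat_priority m) with hlt | hge
    · exact Or.inl hlt
    · exact Or.inr ⟨by omega, le_of_lt h2⟩

lemma stepCond_false {x m : String} (h : stepCond x m = false) : keyle m x := by
  unfold stepCond at h
  simp only [Bool.or_eq_false_iff, Bool.and_eq_false_iff, Bool.not_eq_false', decide_eq_true_eq, decide_eq_false_iff_not] at h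
  obtain ⟨h1, h2⟩ := h
  rcases Nat.lt_or_ge (chat_priority m) (chat_priority x) with hlt | hge
  · exact Or.inl hlt
  · have heq : chat_priority m = chat_priority x := by omega
    rcases h2 with h2 | h2
    · omega
    · exact Or.inr ⟨heq, le_of_not_gt h2⟩

lemma min2?_cons_cons (x y : String) (ys : List String) :
    PySem.List.min2? (x :: y :: ys) (fun n => chat_priority n) (fun n => n)
      = PySem.List.min2? ((if stepCond y x then y else x) :: ys) (fun n => chat_priority n) (fun n => n) := by
  unfold PySem.List.min2?
  rw [List.foldl_cons, List.foldl_cons, List.foldl_cons]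
  congr 1
  show (if stepCond y x = true then some y else some x) = some (if stepCond y x = true then y else x)
  by_cases h : stepCond y x = true <;> simp [h]

lemma min2?_cons_spec (xs : List String) : ∀ x : String,
    ∃ m, PySem.List.min2? (x :: xs) (fun n => chat_priority n) (fun n => n) = some m
      ∧ m ∈ x :: xs ∧ ∀ y ∈ x :: xs, keyle m y := by
  induction xs with
  | nil =>
    intro x
    refine ⟨x, by simp [PySem.List.min2?, List.foldl], List.mem_cons_self, ?_⟩
    intro y hy
    have hyx : y = x := by simpa using hy
    subst hyx
    exact keyle_refl _
  | cons y ys ih =>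
    intro x
    rw [min2?_cons_cons]
    obtain ⟨m, hm, hmem, hall⟩ := ih (if stepCond y x then y else x)
    have hz : keyle m (if stepCond y x then y else x) := hall _ (List.mem_cons_self)
    refine ⟨m, hm, ?_, ?_⟩
    · rcases List.mem_cons.mp hmem with h | h
      · by_cases hc : stepCond y x = true <;> simp [hc] at h <;> simp [h]
      · simp [h]
    · intro w hw
      rcases List.mem_cons.mp hw with hw1 | hw2
      · -- w = x
        rw [hw1]
        by_cases hc : stepCond y x = true
        · exact keyle_trans (by simpa [hc] using hz) (stepCond_true hc)
        · have hc' : stepCond y x = false := by simpa using hc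
          simpa [hc'] using hz
      · rcases List.mem_cons.mp hw2 with hw1' | hw''
        · -- w = y
          rw [hw1']
          by_cases hc : stepCond y x = true
          · simpa [hc] using hz
          · have hc' : stepCond y x = false := by simpa using hc
            exact keyle_trans (by simpa [hc'] using hz) (stepCond_false hc')
        · -- w ∈ ys
          exact hall w (List.mem_cons.mpr (Or.inr hw''))

lemma min2?_eq_of {xs : List String} {m : String} (hm : m ∈ xs) (hall : ∀ y ∈ xs, keyle m y) :
    PySem.List.min2? xs (fun n => chat_priority n) (fun n => n) = some m := by
  cases xs with
  | nil => cases hm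
  | cons x t =>
    obtain ⟨m', hm', hmem', hall'⟩ := min2?_cons_spec t x
    rw [hm']
    exact congrArg some (keyle_antisymm (hall' m hm) (hall m' hmem'))

lemma prio_cases (y : String) :
    (y = "gemma3:4b" ∧ chat_priority y = 0) ∨ (y = "llama3.1:8b" ∧ chat_priority y = 1)
      ∨ (y = "qwen2.5:7b" ∧ chat_priority y = 2) ∨ (y ∉ PREFERRED_CHAT_MODELS ∧ chat_priority y = 3) := by
  by_cases h1 : y = "gemma3:4b"
  · exact Or.inl ⟨h1, by subst h1; rfl⟩
  by_cases h2 : y = "llama3.1:8b"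
  · exact Or.inr (Or.inl ⟨h2, by subst h2; rfl⟩)
  by_cases h3 : y = "qwen2.5:7b"
  · exact Or.inr (Or.inr (Or.inl ⟨h3, by subst h3; rfl⟩))
  · have hnm : y ∉ PREFERRED_CHAT_MODELS := by
      simp [PREFERRED_CHAT_MODELS, h1, h2, h3]
    exact Or.inr (Or.inr (Or.inr ⟨hnm, by
      simpa [chat_priority, PREFERRED_CHAT_MODELS] using List.idxOf_eq_length_iff.mpr hnm⟩))

-- ===== VERDICT (by name: the statement is the Claim_ definition above) =====
theorem select_preferred_chat_model_spec : Claim_equal_select_preferred_chat_model := by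
  intro model_names _
  unfold Spec_select_preferred_chat_model select_preferred_chat_model select_preferred_chat_model_alt
  set cs := model_names.filter (fun name => is_chat_model_name name) with hcsdef
  by_cases hempty : cs.isEmpty
  · simp [hempty]
  · simp only [hempty, Bool.false_eq_true, if_false]
    by_cases hg : "gemma3:4b" ∈ cs
    · have hfind : PREFERRED_CHAT_MODELS.find? (fun p => cs.contains p) = some "gemma3:4b" := by
        simp [PREFERRED_CHAT_MODELS, hg]
      rw [hfind]
      refine (min2?_eq_of hg ?_).symm
      intro y hy
      rcases prio_cases y with ⟨hy1, hp⟩ | ⟨hy1, hp⟩ | ⟨hy1, hp⟩ | ⟨hy1, hp⟩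
      · subst hy1; exact keyle_refl _
      all_goals exact Or.inl (by rw [hp]; decide)
    · by_cases hl : "llama3.1:8b" ∈ cs
      · have cg : cs.contains "gemma3:4b" = false := by simpa using hg
        have hfind : PREFERRED_CHAT_MODELS.find? (fun p => cs.contains p) = some "llama3.1:8b" := by
          simp [PREFERRED_CHAT_MODELS, List.find?, hg, hl]
        rw [hfind]
        refine (min2?_eq_of hl ?_).symm
        intro y hy
        rcases prio_cases y with ⟨hy1, hp⟩ | ⟨hy1, hp⟩ | ⟨hy1, hp⟩ | ⟨hy1, hp⟩
        · exact absurd (hy1 ▸ hy) hg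
        · subst hy1; exact keyle_refl _
        all_goals exact Or.inl (by rw [hp]; decide)
      · by_cases hq : "qwen2.5:7b" ∈ cs
        · have cg : cs.contains "gemma3:4b" = false := by simpa using hg
          have cl : cs.contains "llama3.1:8b" = false := by simpa using hl
          have hfind : PREFERRED_CHAT_MODELS.find? (fun p => cs.contains p) = some "qwen2.5:7b" := by
            simp [PREFERRED_CHAT_MODELS, List.find?, hg, hl, hq]
          rw [hfind]
          refine (min2?_eq_of hq ?_).symm
          intro y hy
          rcases prio_cases y with ⟨hy1, hp⟩ | ⟨hy1, hp⟩ | ⟨hy1, hp⟩ | ⟨hy1, hp⟩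
          · exact absurd (hy1 ▸ hy) hg
          · exact absurd (hy1 ▸ hy) hl
          · subst hy1; exact keyle_refl _
          · exact Or.inl (by rw [hp]; decide)
        · have cg : cs.contains "gemma3:4b" = false := by simpa using hg
          have cl : cs.contains "llama3.1:8b" = false := by simpa using hl
          have cq : cs.contains "qwen2.5:7b" = false := by simpa using hq
          have hfind : PREFERRED_CHAT_MODELS.find? (fun p => cs.contains p) = none := by
            simp [PREFERRED_CHAT_MODELS, List.find?, hg, hl, hq]
          rw [hfind]
          have hne : cs ≠ [] := by simpa [List.isEmpty_iff] using hempty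
          obtain ⟨hd, tl, hsort⟩ : ∃ hd tl, PySem.List.sorted cs (fun x => x) false = hd :: tl := by
            cases hs : PySem.List.sorted cs (fun x => x) false with
            | nil => exact absurd ((PySem.List.sorted_eq_nil_iff cs (fun x => x) false).mp hs) hne
            | cons a b => exact ⟨a, b, rfl⟩
          rw [hsort]
          have hmem : hd ∈ cs := (PySem.List.mem_sorted cs (fun x => x) false hd).mp (hsort ▸ List.mem_cons_self)
          have hprio3 : ∀ z ∈ cs, chat_priority z = 3 := by
            intro z hz
            rcases prio_cases z with ⟨hz1, _⟩ | ⟨hz1, _⟩ | ⟨hz1, _⟩ | ⟨_, hp⟩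
            · exact absurd (hz1 ▸ hz) hg
            · exact absurd (hz1 ▸ hz) hl
            · exact absurd (hz1 ▸ hz) hq
            · exact hp
          refine (min2?_eq_of hmem ?_).symm
          intro y hy
          exact Or.inr ⟨(hprio3 hd hmem).trans (hprio3 y hy).symm,
            PySem.List.key_head_sorted_le cs (fun x => x) hsort y hy⟩
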